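/- GENERATED by mk_final_copies.py from the proof of the farm's unit `start_decoder.C10` (farm:start_decoder.C10.1: Lemmas.lean) as the
   re-elaboration sweep compiled it — do not edit. -/
/-
  Unit `start_decoder.C10` (`++i` of line 3746: `add dword [rsp+30H], 1 ; jmp 114298`): the invariant-level lemmas.

      sd4_carry       the coarse FRAME of `Real.SD4` (AllKept + shadow untouched + the constant slots): no such lemma in the tree
      obj_off_frame   `*f` (a stack object of a CALLER's frame) lies above start_decoder's return-address slot, or off the stack
      allKept_slot    a store into the slot of `i` keeps every allocated block
      exit_c2         `BodyC10 i` in the memory before the store gives `BodyC2 (i + 1)` in the state after the two instructions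
-/
import Vorbis.Spec.StartDecoderATest
import Vorbis.Spec.StartDecoderBTest

namespace Vorbis.Spec.start_decoder_C10
open X86 X86.User Asan Vorbis Vorbis.Spec Vorbis.Spec.StartDecoder

/-- **The coarse FRAME of `SD4 i`** (the invariant at the head of iteration `i` of the codebook loop): every allocated block is
kept (so `*f`, the codebooks block, every table), no shadow byte changed, and the compiler's constant slots `[R + 8, R + 28H)`
read the same. What a spill into start_decoder's own frame needs (`++i` of line 3746 writes `dword [R + 30H]`). -/
theorem sd4_carry {len i : Nat} {A : Arena × List Obj} {Blk : Block → Prop} {Live : Nat → Prop} {mem mem' : Mem} {f R : Nat}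
    (h : Real.SD4 len i A Blk Live mem f R) (hall : AllKept Blk mem mem') (hsh : ShadowUntouched mem mem')
    (hslots : Mem.EqOn (R + 8) (R + 0x28) mem mem') (hR : R + 0x28 ≤ 2 ^ 64) :
    Real.SD4 len i A Blk Live mem' f R := by
  have hL := groups_laws len
  have hob : Blk (objBlock f) := h.bits.OB1
  have hk := hall _ hob
  have hin := hk.inside
  simp only [vblock] at hin
  have hsub : ∀ B, Blk B → Blk B := fun _ hB => hB
  -- the two fields that name the codebooks block
  have he : ObjEq [(160, 176)] mem f mem' f := ObjEq.of_kept_obj hk (by decide)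
  have ecbs : stb_vorbis.codebooks mem' f = stb_vorbis.codebooks mem f := by
    simp only [vacc, voff]
    exact he.u64 168 (by decide)
  have ecnt : stb_vorbis.codebook_count mem' f = stb_vorbis.codebook_count mem f := by
    simp only [vacc, voff]
    exact he.i32 160 (by decide)
  have hcb0 := h.cb0 (by omega)
  refine
    { env := h.env.eqOn hsh
      frame := h.frame.frame hslots hR
      arena := ?arena
      setups := h.setups
      noTemps := h.noTemps
      bits := hL.bits.carries _ _ _ _ _ hall hsub hob h.bits
      first := ?first
      discard0 := ?discard0
      header := fun h1 => hL.header.carries _ _ _ _ _ hall hsub hob (h.header h1)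
      commentZero := fun h1 => absurd h1 (by omega)
      comment := fun h2 => hL.comment.carries _ _ _ _ _ hall hsub hob (h.comment h2)
      cb0 := fun h3 => ⟨hL.cb0.carries _ _ _ _ _ hall hsub hob hcb0.1, ?nonnull⟩
      codebooks := fun h5 => absurd h5 (by omega)
      floor := fun h6 => absurd h6 (by omega)
      lfl := fun h6 => absurd h6 (by omega)
      residue := fun h7 => absurd h7 (by omega)
      mapping := fun h8 => absurd h8 (by omega)
      mode := fun h9 => absurd h9 (by omega)
      buffers := fun h10 => absurd h10 (by omega)
      mdct := fun h11 => absurd h11 (by omega)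
      temp := fun h12 => absurd h12 (by omega)
      rest := ?rest
      done := CodebooksUpTo.carry hL hall hsub hob h.done
      zf := ?zf }
  case arena =>
    exact ArenaOK.frame_obj h.arena hin hk.same
  case first =>
    have := h.first
    simp only [vacc, voff] at this ⊢
    rw [hk.u8 _ (by simp only [vblock]; omega) (by simp only [vblock, voff]; omega)]
    exact this
  case discard0 =>
    have := h.discard0
    simp only [vacc, voff] at this ⊢
    rw [hk.i32 _ (by simp only [vblock]; omega) (by simp only [vblock, voff]; omega)]
    exact this
  case nonnull =>
    rw [ecbs]
    exact hcb0.2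
  case rest =>
    apply ZeroRange.frame h.rest
    · apply Mem.EqOn.mono hk.same
      · simp only [vblock]
        omega
      · simp only [vblock, voff]
        omega
    · simp only [voff] at hin ⊢
      omega
  case zf =>
    have hz : ZF mem (stb_vorbis.codebooks mem f) (stb_vorbis.codebook_count mem f).toNat i := h.zf
    show ZF mem' (stb_vorbis.codebooks mem' f) (stb_vorbis.codebook_count mem' f).toNat i
    rw [ecbs, ecnt]
    have hblk : Blk (codebooksBlock mem f) := CB0.block hcb0.1 hcb0.2
    have hkc := hall _ hblk
    have hupto := h.done.upto
    have hsame := hkc.same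
    have hinc := hkc.inside
    simp only [vblock] at hsame hinc
    apply ZF.same hz
    · apply Mem.EqOn.mono hsame
      · exact Nat.le_add_right _ _
      · exact Nat.le_refl _
    · omega
    · exact hinc

/-- **Where `*f` is, seen from inside start_decoder**: it is the stack object `p` of a CALLER's protected frame — above the slot
of the return address — or no stack object at all. So no spill into start_decoder's own frame `[R, RA)` touches it. -/
theorem obj_off_frame {u₀ : State} {g : Ghost} {pc : Word} {A : Arena × List Obj} {v : State}
    (fr : Frame u₀ g pc A v) (hh : g.Hand A) :
    g.RA + 8 ≤ g.f ∨ g.f + Off.sizeof.stb_vorbis ≤ 0x700000 ∨ 0x800000 ≤ g.f := by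
  obtain ⟨o, ho, k1, k2⟩ := hh.obj
  rcases List.mem_append.mp ho with hst | hoth
  · -- a stack object of a caller's frame
    unfold stackObjs at hst
    obtain ⟨bF, hbF, hin⟩ := List.mem_flatMap.mp hst
    have hmem : bF ∈ g.frames' := List.mem_cons_of_mem _ hbF
    obtain ⟨a1, a2, _, _, _⟩ := fr.shadow.stack.active bF hmem
    have hg := (FrameLayout.objsAt_gran a1 a2 hin).1
    have hc := fr.callers bF hbF
    have e : o.gLo = o.base / 8 := rfl
    left
    omega
  · -- an object off the stack region
    have hoff := fr.shadow.off o hoth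
    unfold OffStack at hoff
    right
    omega

/-- The one window of segment `C10`: the dword `i` of line 3746 at `[R + 30H]`. -/
def slotOfI (g : Ghost) : List Span := [⟨g.R + 0x30, g.R + 0x34⟩]

/-- **A store into the slot of `i` keeps every allocated block** of start_decoder's block predicate: the arena's setup blocks and
the fixed objects lie off the stack region, `*f` above the return address. -/
theorem allKept_slot {u₀ : State} {g : Ghost} {i : Nat} {A : Arena × List Obj} {v : State} {mem' : Mem}
    (hb : BodyC10 u₀ g i A v) (hs : Mem.SameExcept (slotOfI g) v.mem mem') : AllKept (g.Blk A) v.mem mem' := by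
  have fr := hb.frame
  obtain ⟨hRA, _⟩ := fr.r_eq
  obtain ⟨_, hlo, hhi⟩ := fr.ra
  simp only [steady, depth] at hRA hlo
  have hlen : g.len ≤ 0x1FF000 := hb.sd.bits.remaining_le.2
  have harena : ArenaOK A.1 A.2 v.mem g.f := hb.sd.arena
  apply AllKept.of_sameExcept hb.sd.env.ok hs
  intro B hB w hw
  have ew : w = ⟨g.R + 0x30, g.R + 0x34⟩ := List.mem_singleton.mp hw
  subst ew
  simp only []
  rcases hB with hset | hext
  · -- a setup block of the arena
    have := harena.blk_off_stack hset
    omega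
  · rcases List.mem_cons.mp hext with rfl | hfix
    · -- `*f`
      have := obj_off_frame fr hb.hand
      simp only [vblock, voff] at this ⊢
      omega
    · -- a fixed object
      have := fixed_off_stack g.len hlen B hfix
      omega

/-- A qword of start_decoder's frame other than the slot of `i` reads the same after the store. -/
theorem slot_u64 {g : Ghost} {mem mem' : Mem} (hs : Mem.SameExcept (slotOfI g) mem mem') (a : Nat)
    (ha : a + 8 ≤ g.R + 0x30 ∨ g.R + 0x34 ≤ a) (hlt : a + 8 < 2 ^ 64) : mem'.u64 a = mem.u64 a := by
  unfold Mem.u64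
  apply hs.readLE
  · rw [toNat_addr a (by omega)]
    exact hlt
  · intro w hw
    have ew : w = ⟨g.R + 0x30, g.R + 0x34⟩ := List.mem_singleton.mp hw
    subst ew
    rw [toNat_addr a (by omega)]
    simp only []
    omega

/-- A region that does not meet the slot of `i` reads the same after the store. -/
theorem slot_eqOn {g : Ghost} {mem mem' : Mem} (hs : Mem.SameExcept (slotOfI g) mem mem') (lo hi : Nat)
    (hd : hi ≤ g.R + 0x30 ∨ g.R + 0x34 ≤ lo) : Mem.EqOn lo hi mem mem' := by
  apply hs.eqOn
  intro w hw
  have ew : w = ⟨g.R + 0x30, g.R + 0x34⟩ := List.mem_singleton.mp hw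
  subst ew
  simp only []
  exact hd

/-- **THE EXIT OF SEGMENT `C10`**: the state `w` after `add dword [rsp+30H], 1 ; jmp 114298` — its memory is that of the entry
assertion but for the slot of `i`, which now holds `i + 1` — satisfies the assertion of the loop head for `i + 1`. -/
theorem exit_c2 {u₀ : State} {g : Ghost} {i : Nat} {A : Arena × List Obj} {v w : State} (hb : BodyC10 u₀ g i A v)
    (hrip : w.rip = pc_C2) (hrsp : w.reg .rsp = addr g.R) (hinv : abiInv w) (hcode : CodeOK u₀ w.mem)
    (hs : Mem.SameExcept (slotOfI g) v.mem w.mem) (hi : w.mem.u32 (g.R + 0x30) = i + 1) : BodyC2 u₀ g (i + 1) A w := by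
  have fr := hb.frame
  obtain ⟨hRA, hR8⟩ := fr.r_eq
  obtain ⟨_, hlo, hhi⟩ := fr.ra
  simp only [steady, depth] at hRA hlo
  have hun : ShadowUntouched v.mem w.mem := slot_eqOn hs _ _ (by omega)
  have hall : AllKept (g.Blk A) v.mem w.mem := allKept_slot hb hs
  have hob : g.Blk A (objBlock g.f) := hb.sd.bits.OB1
  -- the common part
  have fr' : Frame u₀ g pc_C2 A w :=
    { entry := fr.entry
      rip := hrip
      rsp := hrsp
      shadowIdx := by
        rw [slot_u64 hs _ (by omega) (by omega)]
        exact fr.shadowIdx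
      saved_rbx := by
        rw [slot_u64 hs _ (by omega) (by omega)]
        exact fr.saved_rbx
      saved_rbp := by
        rw [slot_u64 hs _ (by omega) (by omega)]
        exact fr.saved_rbp
      saved_r12 := by
        rw [slot_u64 hs _ (by omega) (by omega)]
        exact fr.saved_r12
      saved_r13 := by
        rw [slot_u64 hs _ (by omega) (by omega)]
        exact fr.saved_r13
      saved_r14 := by
        rw [slot_u64 hs _ (by omega) (by omega)]
        exact fr.saved_r14
      saved_r15 := by
        rw [slot_u64 hs _ (by omega) (by omega)]
        exact fr.saved_r15
      saved_ra := by
        rw [slot_u64 hs _ (by omega) (by omega)]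
        exact fr.saved_ra
      code := hcode
      inv := hinv
      shadow := fr.shadow.untouched hun
      offText := fr.offText
      ext := fr.ext
      callers := fr.callers
      sh7 := by
        intro j hj
        have e : (UInt64.ofNat (Vorbis.Globals.log2_4.beg + j)).toNat = 0x120640 + j :=
          toNat_addr (0x120640 + j) (by omega)
        rw [hs.readLE _ 1 (by rw [e]; omega) ?_]
        · exact fr.sh7 j hj
        · intro s hsm
          have es : s = ⟨g.R + 0x30, g.R + 0x34⟩ := List.mem_singleton.mp hsm
          subst es
          rw [e]
          simp only []
          omega
      same := by
        apply fr.same.trans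
        apply hs.mono
        intro s hsm a h1 h2
        have es : s = ⟨g.R + 0x30, g.R + 0x34⟩ := List.mem_singleton.mp hsm
        subst es
        simp only [] at h1 h2
        refine ⟨⟨g.RA - depth, g.RA⟩, List.mem_cons_self, ?_, ?_⟩
        · simp only [depth]
          omega
        · simp only []
          omega }
  -- the record with the ages: `*f`'s windows and every block of the arena read the same
  obtain ⟨A2, A3, ha⟩ := hb.ages
  have ha' : BookTrans A2 A3 A.1 A.1 w.mem g.f (i + 1) :=
    ha.frame_old (ObjEq.of_kept_obj (hall _ hob) (by decide)) (fun B hB => hall B (up g A B hB))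
  exact
    { frame := fr'
      hand := hb.hand
      slot_f := by
        rw [slot_u64 hs _ (by omega) (by omega)]
        exact hb.slot_f
      slot_i := hi
      sd := sd4_carry hb.sd hall hun (slot_eqOn hs _ _ (by omega)) (by omega)
      ages := ⟨A2, A3, ha'⟩ }

end Vorbis.Spec.start_decoder_C10
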